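-- pv_equiv track=rewrite | github.com/JerryZhou54/gptq | draw_sensitivity.py | to_layerwise
-- ===== SOURCE A (Python) =====
-- def to_layerwise(quant_loss):
--     layerwise = {}
--     for layer, loss in quant_loss.items():
--         layer = layer.split('.')[0]
--         if layer not in layerwise:
--             layerwise[layer] = loss
--         else:
--             layerwise[layer] += loss
--     return layerwise
-- ===== SOURCE B (Python) =====
-- def to_layerwise(quant_loss):
--     # Two-pass: collect distinct prefixes in first-occurrence order, then sum each group.
--     prefixes = list(dict.fromkeys(layer.split('.')[0] for layer in quant_loss))
--     return {p: sum(loss for layer, loss in quant_loss.items()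
--                    if layer.split('.')[0] == p)
--             for p in prefixes}
-- ===== Notes on version B (the rewrite author's own statement) =====
-- stated objective: alternative
-- what changed: Replaced the single-pass dict accumulation with a two-pass decomposition: first an ordered dedup of the layer prefixes (dict.fromkeys), then one comprehension that sums the losses of each prefix group by filtering the input.
import Mathlib
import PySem

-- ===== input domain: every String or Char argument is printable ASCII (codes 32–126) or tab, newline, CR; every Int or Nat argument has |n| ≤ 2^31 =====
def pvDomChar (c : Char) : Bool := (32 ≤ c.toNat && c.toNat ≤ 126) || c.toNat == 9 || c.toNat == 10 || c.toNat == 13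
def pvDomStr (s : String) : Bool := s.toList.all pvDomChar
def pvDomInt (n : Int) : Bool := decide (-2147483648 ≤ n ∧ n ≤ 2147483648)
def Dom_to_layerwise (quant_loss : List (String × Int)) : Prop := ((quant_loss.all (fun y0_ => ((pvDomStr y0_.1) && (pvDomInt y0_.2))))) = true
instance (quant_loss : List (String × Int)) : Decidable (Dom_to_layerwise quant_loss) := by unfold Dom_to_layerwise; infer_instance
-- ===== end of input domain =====

-- B replaces A's single-pass dict accumulation with a two-pass decomposition (ordered
-- dedup of prefixes, then one sum per prefix group); same result, no speed claim.

-- layer.split('.')[0] — shared by both Pythons; split? is some (sep ≠ "") and never [], so getD/headD are exact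
def pvPrefix (s : String) : String := ((PySem.Str.split? s ".").getD []).headD ""

-- ===== PORT A =====
def to_layerwise (quant_loss : List (String × Int)) : List (String × Int) :=
  (quant_loss.foldl (fun lw pr =>
      let layer := pvPrefix pr.1
      if lw.contains layer = false then
        lw.insert layer pr.2
      else
        lw.insert layer ((lw.get? layer).getD 0 + pr.2))
    (PySem.Dict.empty : PySem.Dict String Int)).items

-- ===== PORT B =====
def to_layerwise_alt (quant_loss : List (String × Int)) : List (String × Int) :=
  let prefixes := PySem.List.dedup (quant_loss.map (fun pr => pvPrefix pr.1))
  prefixes.map (fun p =>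
    (p, ((quant_loss.filter (fun pr => pvPrefix pr.1 == p)).map (·.2)).sum))

-- ===== PRECONDITION & SPEC =====
def Spec_to_layerwise (quant_loss : List (String × Int)) (out : List (String × Int)) : Prop := out = to_layerwise_alt quant_loss
instance (quant_loss : List (String × Int)) (out : List (String × Int)) : Decidable (Spec_to_layerwise quant_loss out) := by unfold Spec_to_layerwise; infer_instance

-- ===== CLAIM (what is proved, stated in full; the proofs are below) =====
def Claim_equal_to_layerwise : Prop := ∀ (quant_loss : List (String × Int)), Dom_to_layerwise quant_loss → Spec_to_layerwise quant_loss (to_layerwise quant_loss)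

-- ===== LEMMAS AND PROOFS =====

-- group sum of B
def pvSum (q : List (String × Int)) (p : String) : Int :=
  ((q.filter (fun pr => pvPrefix pr.1 == p)).map (·.2)).sum

lemma pvSum_append_singleton (q : List (String × Int)) (x : String × Int) (p : String) :
    pvSum (q ++ [x]) p = pvSum q p + (if pvPrefix x.1 = p then x.2 else 0) := by
  by_cases h : pvPrefix x.1 = p
  · simp [pvSum, List.filter_append, h]
  · simp [pvSum, List.filter_append, h]

lemma pvSum_eq_zero_of_not_mem (q : List (String × Int)) (p : String)
    (h : p ∉ q.map (fun pr => pvPrefix pr.1)) : pvSum q p = 0 := by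
  have : q.filter (fun pr => pvPrefix pr.1 == p) = [] := by
    rw [List.filter_eq_nil_iff]
    intro a ha hb
    exact h (List.mem_map.2 ⟨a, ha, by simpa using hb⟩)
  simp [pvSum, this]

-- the core invariant: A's dict after the loop has exactly B's items
lemma to_layerwise_items (q : List (String × Int)) :
    to_layerwise q = (PySem.List.dedup (q.map (fun pr => pvPrefix pr.1))).map
      (fun p => (p, pvSum q p)) := by
  induction q using List.reverseRecOn with
  | nil => rfl
  | append_singleton q x ih =>
    have hkeysnd : (PySem.Set.ofList (q.map (fun pr => pvPrefix pr.1))).Nodup :=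
      PySem.Set.nodup_ofList _
    simp only [to_layerwise, List.foldl_append, List.foldl_cons, List.foldl_nil] at *
    set d := q.foldl (fun lw pr =>
      let layer := pvPrefix pr.1
      if lw.contains layer = false then
        lw.insert layer pr.2
      else
        lw.insert layer ((lw.get? layer).getD 0 + pr.2))
      (PySem.Dict.empty : PySem.Dict String Int) with hd
    have hitems : d.items = (PySem.Set.ofList (q.map (fun pr => pvPrefix pr.1))).map
        (fun p => (p, pvSum q p)) := by simpa [PySem.List.dedup_eq_ofList] using ih
    have hkeys : d.keys = PySem.Set.ofList (q.map (fun pr => pvPrefix pr.1)) := by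
      rw [PySem.Dict.keys, hitems, List.map_map]; simp [Function.comp_def]
    have hnodup : d.keys.Nodup := by rw [hkeys]; exact hkeysnd
    set p := pvPrefix x.1 with hp
    simp only [PySem.List.dedup_eq_ofList, List.map_append, List.map_cons, List.map_nil,
      PySem.Set.ofList_append_singleton]
    by_cases hmem : p ∈ q.map (fun pr => pvPrefix pr.1)
    · -- repeated prefix: in-place update on A's side, same key list on B's side
      have hmem' : p ∈ PySem.Set.ofList (q.map (fun pr => pvPrefix pr.1)) :=
        (PySem.Set.mem_ofList _ _).2 hmem
      have hcont : d.contains p = true := by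
        rw [PySem.Dict.contains_eq_decide_mem_keys, hkeys]; simpa using hmem'
      have hget : d.get? p = some (pvSum q p) := by
        refine PySem.Dict.get?_of_mem_items d ?_ hnodup
        rw [hitems]; exact List.mem_map.2 ⟨p, hmem', rfl⟩
      rw [PySem.Set.add_of_mem hmem']
      simp only [hcont, Bool.true_eq_false, if_false, hget, Option.getD_some]
      rw [PySem.Dict.items_insert_of_contains d _ hcont, hitems, List.map_map]
      apply List.map_congr_left
      intro a _
      by_cases hap : a = p
      · subst hap; simp [pvSum_append_singleton, hp]
      · have hxa : pvPrefix x.1 ≠ a := fun h => hap (hp.trans h).symm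
        simp [Function.comp, hap, pvSum_append_singleton, if_neg hxa]
    · -- fresh prefix: append on both sides
      have hmem' : p ∉ PySem.Set.ofList (q.map (fun pr => pvPrefix pr.1)) := by
        rw [PySem.Set.mem_ofList]; exact hmem
      have hcont : d.contains p = false := by
        rw [PySem.Dict.contains_eq_decide_mem_keys, hkeys]; simpa using hmem'
      rw [PySem.Set.add_of_not_mem hmem']
      simp only [hcont, if_true]
      rw [PySem.Dict.items_insert_of_not_contains d _ hcont, hitems, List.map_append]
      congr 1
      · apply List.map_congr_left
        intro a ha
        have hap : pvPrefix x.1 ≠ a := fun h => hmem' (by rw [hp.trans h]; exact ha)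
        simp only [pvSum_append_singleton, if_neg hap, add_zero]
      · simp only [List.map_cons, List.map_nil, pvSum_append_singleton, if_pos hp.symm,
          pvSum_eq_zero_of_not_mem q _ hmem, zero_add]

-- ===== VERDICT (by name: the statement is the Claim_ definition above) =====
theorem to_layerwise_spec : Claim_equal_to_layerwise := by
  intro q _
  show to_layerwise q = to_layerwise_alt q
  rw [to_layerwise_items]
  rfl
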